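-- pv_equiv track=rewrite | github.com/other114514/othersWork | test3.py | solution
-- ===== SOURCE A (Python) =====
-- def solution(nums):
--     ret=[]
--     for i in range(len(nums)):
--         maxium=nums[i:][0]
--         result=[]
--         for j in nums[i:]:
--             if j>=maxium:
--                 maxium =j
--                 result.append(j)
--                 if len(result)>len(ret):
--                     ret=result
--         return ret
-- ===== SOURCE B (Python) =====
-- def solution(nums):
--     # divide and conquer: leaders(seg, bound) = elements of seg that are >= every
--     # earlier element of seg and >= bound; combine halves by threading the left
--     # half's maximum as the right half's bound
--     if not nums:
--         return []
--     def rec(seg, bound):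
--         if len(seg) == 1:
--             x = seg[0]
--             return ([x], x) if x >= bound else ([], bound)
--         mid = len(seg) // 2
--         left, bl = rec(seg[:mid], bound)
--         right, br = rec(seg[mid:], bl)
--         return left + right, br
--     return rec(nums, nums[0])[0]
-- ===== Notes on version B (the rewrite author's own statement) =====
-- stated objective: alternative
-- what changed: B computes the prefix-leaders by divide and conquer, recursively splitting the list in half and threading the left half's maximum as the right half's bound, instead of A's single conditional-append loop with the ret/result aliasing trick; Pre_ excludes the empty list, on which A returns None instead of a list.
-- outside the precondition, e.g. on solution([]): A returns None, B returns []
import Mathlib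
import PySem

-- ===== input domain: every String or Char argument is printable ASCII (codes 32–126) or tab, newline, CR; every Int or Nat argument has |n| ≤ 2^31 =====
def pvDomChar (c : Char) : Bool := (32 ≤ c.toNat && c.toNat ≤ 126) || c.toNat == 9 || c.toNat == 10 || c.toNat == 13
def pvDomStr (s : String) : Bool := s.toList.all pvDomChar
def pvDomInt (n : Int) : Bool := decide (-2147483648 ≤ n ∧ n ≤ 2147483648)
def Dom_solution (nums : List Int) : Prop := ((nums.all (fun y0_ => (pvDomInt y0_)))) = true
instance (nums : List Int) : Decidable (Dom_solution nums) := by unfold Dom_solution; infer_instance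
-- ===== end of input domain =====

-- B replaces A's single conditional-append loop by a divide-and-conquer recursion; return-value equivalence on nonempty lists.

-- ===== PORT A =====
-- A's outer loop returns inside its first iteration, so only i = 0 runs;
-- the inner loop over nums is the foldl below (ret/result are compared and
-- reassigned by value exactly as Python's lengths dictate).
def solution (nums : List Int) : List Int :=
  match nums with
  | [] => []   -- Python falls through the loop and returns None here; excluded by Pre_solution
  | m0 :: _ =>
    (nums.foldl
      (fun (st : Int × List Int × List Int) j =>
        let maxium := st.1
        let result := st.2.1
        let ret := st.2.2
        if j ≥ maxium then
          let maxium := j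
          let result := result ++ [j]
          if result.length > ret.length then (maxium, result, result)
          else (maxium, result, ret)
        else (maxium, result, ret))
      (m0, [], [])).2.2

-- ===== PORT B =====
-- rec(seg, bound): Python never calls it on []; the [] branch only makes the
-- Lean recursion total.
def recB : List Int → Int → List Int × Int
  | [], bound => ([], bound)
  | [x], bound => if x ≥ bound then ([x], x) else ([], bound)
  | x :: y :: rest, bound =>
    let s := x :: y :: rest
    let mid := s.length / 2
    let p := recB (s.take mid) bound
    let q := recB (s.drop mid) p.2
    (p.1 ++ q.1, q.2)
termination_by seg _ => seg.length
decreasing_by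
  · simp [List.length_take]; omega
  · simp; omega

def solution_alt (nums : List Int) : List Int :=
  match nums with
  | [] => []
  | a :: l => (recB (a :: l) a).1

-- ===== PRECONDITION & SPEC =====
-- Pre_ excludes the empty list: there A returns None, not a list.
def Pre_solution (nums : List Int) : Prop := nums ≠ []
instance (nums : List Int) : Decidable (Pre_solution nums) := by unfold Pre_solution; infer_instance
def pvWitness_solution : List Int := [3, 1, 4, 1, 5]

def Spec_solution (nums : List Int) (out : List Int) : Prop := out = solution_alt nums
instance (nums : List Int) (out : List Int) : Decidable (Spec_solution nums out) := by unfold Spec_solution; infer_instance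

-- ===== CLAIM (what is proved, stated in full; the proofs are below) =====
def Claim_equal_solution : Prop := ∀ (nums : List Int), Dom_solution nums → Pre_solution nums → Spec_solution nums (solution nums)

-- ===== LEMMAS AND PROOFS =====

-- the running-max filter, recursively: elements ≥ the current maximum
def goA (m : Int) : List Int → List Int
  | [] => []
  | j :: l => if j ≥ m then j :: goA j l else goA m l

-- A's fold step, named (definitionally equal to the port's lambda)
def fA (st : Int × List Int × List Int) (j : Int) : Int × List Int × List Int :=
  if j ≥ st.1 then
    if (st.2.1 ++ [j]).length > st.2.2.length then (j, st.2.1 ++ [j], st.2.1 ++ [j])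
    else (j, st.2.1 ++ [j], st.2.2)
  else (st.1, st.2.1, st.2.2)

-- A's fold, started from a state whose result and ret coincide, collects goA
theorem foldA_eq (l : List Int) : ∀ (m : Int) (res : List Int),
    (l.foldl fA (m, res, res)).2.2 = res ++ goA m l := by
  induction l with
  | nil => intro m res; simp [goA]
  | cons j l ih =>
    intro m res
    simp only [List.foldl, goA]
    by_cases h : j ≥ m
    · have hlen : (res ++ [j]).length > res.length := by simp
      simp only [fA, if_pos h, if_pos hlen]
      rw [ih j (res ++ [j])]
      simp
    · simp only [fA]
      rw [if_neg h, if_neg h, ih m res]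

-- goA splits across append, threading the running maximum
theorem goA_append (xs : List Int) : ∀ (ys : List Int) (m : Int),
    goA m (xs ++ ys) = goA m xs ++ goA (xs.foldl max m) ys := by
  induction xs with
  | nil => intro ys m; simp [goA]
  | cons j l ih =>
    intro ys m
    simp only [List.cons_append, goA, List.foldl]
    by_cases h : j ≥ m
    · have : max m j = j := by omega
      rw [if_pos h, this, ih ys j, if_pos h, List.cons_append]
    · have : max m j = m := by omega
      rw [if_neg h, this, ih ys m, if_neg h]

-- recB computes (goA bound seg, foldl max bound seg)
theorem recB_spec (seg : List Int) (bound : Int) :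
    recB seg bound = (goA bound seg, seg.foldl max bound) := by
  induction seg, bound using recB.induct with
  | case1 bound => simp [recB, goA]
  | case2 x bound h =>
    have : max bound x = x := by omega
    simp [recB, goA, if_pos h, this]
  | case3 x bound h =>
    have : max bound x = bound := by omega
    simp [recB, goA, if_neg h, this]
  | case4 x y rest bound s mid p _ ihT ih2 =>
    simp only [p, mid, s] at ih2
    rw [ihT] at ih2
    simp only [recB]
    rw [ihT, ih2]
    have hsplit : (x :: y :: rest).take ((x :: y :: rest).length / 2) ++
        (x :: y :: rest).drop ((x :: y :: rest).length / 2) = x :: y :: rest := by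
      exact List.take_append_drop _ _
    conv_rhs => rw [← hsplit]
    rw [goA_append, List.foldl_append]

theorem solution_eq_alt (nums : List Int) (h : nums ≠ []) :
    solution nums = solution_alt nums := by
  match nums with
  | [] => exact absurd rfl h
  | a :: l =>
    have hA : solution (a :: l) = (List.foldl fA (a, [], []) (a :: l)).2.2 := rfl
    have hB : solution_alt (a :: l) = (recB (a :: l) a).1 := rfl
    rw [hA, hB, foldA_eq, recB_spec]
    simp

-- ===== VERDICT (by name: the statement is the Claim_ definition above) =====
theorem solution_spec : Claim_equal_solution := by
  intro nums _ hpre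
  exact solution_eq_alt nums hpre
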